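-- pv_equiv track=rewrite | github.com/omullo/piprojs | CS1110 labs/Lab14/num_space_runs.py | num_space_runs1
-- ===== SOURCE A (Python) =====
-- def num_space_runs1(s):
--     """Returns: The number of runs of spaces in the string s.
--
--     Examples (we've put ^ markers to "underline" spaces):
--             num_space_runs('  a  f   g    ') returns 4
--                             ^^ ^^ ^^^ ^^^^
--
--             num_space_runs('a  f   g') returns 2
--                              ^^ ^^^
--
--             num_space_runs('  a  bc   d') returns 3
--                             ^^ ^^  ^^^
--     Precondition: s is a nonempty string with letters and spaces"""
--
--     # STUDENTS: The invariant for you to work with is: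
--     #     s[0..i-1] has n runs of spaces, AND:
--     #     in_a_run is a boolean:
--     #          True if i-1 is a valid index and s[i-1] is a space
--     #          False otherwise
--     #
--     # In other words, s[i..len(s)-1] still needs to be checked;
--     # and in_a_run tells us whether a new space would be part of an old run.
--
--
--     # REPLACE THE FOLLOWING WITH CORRECT INITIALIZATION CODE:
--     i = 0
--     n = 0
--     in_a_run = False
--
--     # PUT YOUR WHILE LOOP HERE
--     # Hint1: only increment n when you find a space and are not currently in a run.
--     # Hint2: you need to change in_a_run when:
--     #   (a) you have found a space and you are not currently in a run, or
--     #   (b) you found a non-space and you currently in a run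
--     # Hint3: don't forget to increment your loop variable, if you have one!
--
--     while i<=len(s)-1:
--         if s[i]==' ' and not in_a_run:
--             n+=1
--             in_a_run=True
--         if in_a_run and s[i]!=' ':
--             in_a_run=False
--         i+=1
--     return n
--
--
--
--
--
--
--
--
--
--
--
--
--
--
--     # post: s[0..len(s)-1] contains n runs of spaces
--     # PUT THE RETURN STATEMENT HERE
--     return n
-- ===== SOURCE B (Python) =====
-- def num_space_runs1(s):
--     # Pair each character with its predecessor (None before the first), keep the
--     # characters that start a new run (differ from predecessor) -- these are the
--     # run keys -- and count how many of them are spaces.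
--     keys = [c for prev, c in zip([None] + list(s), s) if c != prev]
--     return keys.count(' ')
-- ===== Notes on version B (the rewrite author's own statement) =====
-- stated objective: idiomatic
-- what changed: Replaces the index-based while loop with an in_a_run flag state machine by a group-and-filter decomposition: zip each character with its predecessor, keep the run-starting characters (group keys) in a comprehension, and count the space keys; the comprehension avoids per-character Python-level index/flag bookkeeping (constant-factor speedup).
import Mathlib
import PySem

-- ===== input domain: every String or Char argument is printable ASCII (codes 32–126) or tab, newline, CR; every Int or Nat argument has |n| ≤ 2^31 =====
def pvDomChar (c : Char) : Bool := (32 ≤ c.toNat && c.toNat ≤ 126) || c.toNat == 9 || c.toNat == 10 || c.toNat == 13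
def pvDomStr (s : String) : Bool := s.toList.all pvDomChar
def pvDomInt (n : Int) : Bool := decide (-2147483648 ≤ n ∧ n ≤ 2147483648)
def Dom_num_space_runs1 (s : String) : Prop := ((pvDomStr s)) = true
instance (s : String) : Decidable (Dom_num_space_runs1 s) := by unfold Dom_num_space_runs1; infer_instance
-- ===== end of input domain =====

-- B rewrites A's while-loop state machine (in_a_run flag) as a group-and-filter
-- pass: collect the run-starting characters and count the spaces (idiomatic).


-- ===== PORT A =====
-- A's while loop over indices i = 0 .. len(s)-1, transcribed as structural
-- recursion over the remaining characters with the same state (n, in_a_run).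
def numSpaceRunsLoopA : List Char → Int → Bool → Int
  | [], n, _ => n
  | c :: rest, n, in_a_run =>
    let p := if c = ' ' ∧ ¬ in_a_run then (n + 1, true) else (n, in_a_run)
    let r' := if p.2 ∧ c ≠ ' ' then false else p.2
    numSpaceRunsLoopA rest p.1 r'

def num_space_runs1 (s : String) : Int :=
  numSpaceRunsLoopA s.toList 0 false

-- ===== PORT B =====
-- B: keys = [c for prev, c in zip([None] + list(s), s) if c != prev]; return keys.count(' ')
def num_space_runs1_alt (s : String) : Int :=
  let keys := (((none :: s.toList.map some).zip s.toList).filter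
      (fun pc => some pc.2 ≠ pc.1)).map Prod.snd
  PySem.List.count keys ' '

-- ===== PRECONDITION & SPEC =====
def Spec_num_space_runs1 (s : String) (out : Int) : Prop := out = num_space_runs1_alt s
instance (s : String) (out : Int) : Decidable (Spec_num_space_runs1 s out) := by unfold Spec_num_space_runs1; infer_instance

-- ===== CLAIM (what is proved, stated in full; the proofs are below) =====
def Claim_equal_num_space_runs1 : Prop := ∀ (s : String), Dom_num_space_runs1 s → Spec_num_space_runs1 s (num_space_runs1 s)

-- ===== LEMMAS AND PROOFS =====

-- B's key extraction, parameterised by the predecessor (zip pattern unfolded one step).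
def pvKeys (p : Option Char) (l : List Char) : List Char :=
  (((p :: l.map some).zip l).filter (fun pc => some pc.2 ≠ pc.1)).map Prod.snd

theorem pvKeys_nil (p : Option Char) : pvKeys p [] = [] := rfl

theorem pvKeys_cons (p : Option Char) (c : Char) (rest : List Char) :
    pvKeys p (c :: rest) =
      (if (some c : Option Char) ≠ p then [c] else []) ++ pvKeys (some c) rest := by
  simp only [pvKeys, List.map, List.zip_cons_cons, List.filter]
  split_ifs with h <;> simp_all

theorem pvLoopA_cons (c : Char) (rest : List Char) (n : Int) (r : Bool) :
    numSpaceRunsLoopA (c :: rest) n r =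
      numSpaceRunsLoopA rest (if c = ' ' ∧ r = false then n + 1 else n) (decide (c = ' ')) := by
  by_cases hc : c = ' ' <;> cases r <;> simp [numSpaceRunsLoopA, hc]

theorem pvLoopA_eq_count (l : List Char) (n : Int) (r : Bool) (p : Option Char)
    (hp : p = some ' ' ↔ r = true) :
    numSpaceRunsLoopA l n r = n + ((pvKeys p l).count ' ' : Int) := by
  induction l generalizing n r p with
  | nil => simp [numSpaceRunsLoopA, pvKeys_nil]
  | cons c rest ih =>
    rw [pvLoopA_cons, pvKeys_cons]
    by_cases hc : c = ' '
    · subst hc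
      rw [ih _ _ (some ' ') (by simp)]
      cases r with
      | true =>
        have hps : p = some ' ' := hp.mpr rfl
        simp [hps]
      | false =>
        have hps : p ≠ some ' ' := fun h => by simpa using hp.mp h
        simp [Ne.symm hps]
        ring
    · rw [ih _ _ (some c) (by simp [hc])]
      split_ifs with h1 h2 <;> simp_all

theorem pv_eq (s : String) : num_space_runs1 s = num_space_runs1_alt s := by
  unfold num_space_runs1 num_space_runs1_alt
  rw [pvLoopA_eq_count s.toList 0 false none (by simp)]
  simp [pvKeys, PySem.List.count]

-- ===== VERDICT (by name: the statement is the Claim_ definition above) =====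
theorem num_space_runs1_spec : Claim_equal_num_space_runs1 := by
  intro s _
  exact pv_eq s
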